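-- pv_equiv track=rewrite | github.com/rickyurvinauc/IIC1103_TAV_2025 | ayudantias/ayudantia2/P14-c-strings-palabras-equilibradas-C.py | mayor_trozo_completamente_equilibrado
-- ===== SOURCE A (Python) =====
-- def es_vocal(c):
--     # retorna True si c es vocal, False en caso contrario
--     return c in "aeiouAEIOU"
--
-- def intercalado(palabra):
--     # recorremos la palabra y verificamos que cada caracter
--     for i in range(len(palabra) - 1):
--         #vemos si el caracter palabra[i] y el siguiente palabra[i + 1] son ambos vocales o ambos consonantes
--         if es_vocal(palabra[i]) == es_vocal(palabra[i + 1]):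
--             # si ambos son vocales no estan intercalados consonantes con vocal
--             return False
--     #en caso contrario, si recorrimos toda la palabra sin encontrar dos vocales o dos consonantes juntas, estan intercalados
--     return True
--
-- def completamente_equilibrada(palabra):
--     if len(palabra) % 2 != 0:
--         return False
--
--     # inicializar contador de vocales
--     vocales = 0
--     # recorrer la palabra contando vocales
--     for c in palabra:
--         if es_vocal(c):
--             vocales += 1
--     # calcular consonantes en base al largo de la palabra sin vocales
--     consonantes = len(palabra) - vocales
--     #cantidad de vocales igual a cantidad de consonantes
--     #y ademas intercalado(palabra) debe ser verdadero para que sean intercaladas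
--     return vocales == consonantes and intercalado(palabra)
--
-- def mayor_trozo_completamente_equilibrado(palabra):
--     # inicializar mejor trozo encontrado
--     mejor = ""
--     # n va a ser el largo de la palabra
--     n = len(palabra)
--     # recorrer todos los posibles trozos de la palabra
--     for i in range(n):
--         # j va desde i+1 hasta n+1 para considerar todos los trozos que empiezan en i
--         for j in range(i + 1, n + 1):
--             trozo = palabra[i:j]
--             # si el trozo es menor o igual al mejor encontrado hasta el momento, no sirve
--             if len(trozo) <= len(mejor):
--                 continue
--             if completamente_equilibrada(trozo) == True:
--                 mejor = trozo
--     # retornar el mejor encontrado final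
--     return mejor
-- ===== SOURCE B (Python) =====
-- def mayor_trozo_completamente_equilibrado(palabra):
--     # One linear scan over maximal vowel/consonant-alternating runs: the longest
--     # completely balanced piece inside a run is its longest even-length prefix.
--     def es_vocal(c):
--         return c in "aeiouAEIOU"
--     best_len = 0
--     best_start = 0
--     run_start = 0
--     n = len(palabra)
--     for i in range(1, n):
--         if es_vocal(palabra[i]) == es_vocal(palabra[i - 1]):
--             run_start = i
--         run_len = i - run_start + 1
--         even = run_len - run_len % 2
--         if even > best_len:
--             best_len = even
--             best_start = i - even + 1
--     return palabra[best_start:best_start + best_len]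
-- ===== Notes on version B (the rewrite author's own statement) =====
-- stated objective: faster
-- what changed: Replaced the O(n^3) scan of all substrings (with per-substring vowel counting and alternation checks) by a single left-to-right pass over maximal vowel/consonant-alternating runs, recording the longest even-length piece (leftmost on ties).
import Mathlib
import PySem

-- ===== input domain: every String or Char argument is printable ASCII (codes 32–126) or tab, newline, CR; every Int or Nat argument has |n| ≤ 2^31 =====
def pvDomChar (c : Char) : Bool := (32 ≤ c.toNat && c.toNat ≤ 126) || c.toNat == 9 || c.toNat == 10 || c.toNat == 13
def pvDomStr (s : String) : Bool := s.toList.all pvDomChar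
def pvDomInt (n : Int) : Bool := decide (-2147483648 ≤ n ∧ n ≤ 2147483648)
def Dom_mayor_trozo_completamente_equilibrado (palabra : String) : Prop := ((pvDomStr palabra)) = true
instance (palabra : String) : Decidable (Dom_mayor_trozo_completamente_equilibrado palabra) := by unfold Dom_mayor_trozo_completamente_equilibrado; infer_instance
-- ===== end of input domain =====

-- B replaces A's cubic scan of all substrings by one linear left-to-right pass over
-- maximal vowel/consonant-alternating runs (objective: faster).

-- ===== PORT A =====
-- 'c in "aeiouAEIOU"' for the 1-character string c is membership of the character
def es_vocal (c : Char) : Bool := "aeiouAEIOU".toList.contains c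

-- the early-return-False loop over range(len(palabra)-1) is .all of the negated test (no side effects)
def intercalado (palabra : List Char) : Bool :=
  (PySem.List.pyRange 0 (PySem.List.len palabra - 1) 1).all
    (fun i => !(es_vocal (PySem.List.pyGetD palabra i ' ') ==
                es_vocal (PySem.List.pyGetD palabra (i + 1) ' ')))

def completamente_equilibrada (palabra : List Char) : Bool :=
  if PySem.Int.mod (PySem.List.len palabra) 2 != 0 then false
  else
    let vocales : Int := palabra.foldl (fun acc c => if es_vocal c then acc + 1 else acc) 0
    let consonantes : Int := PySem.List.len palabra - vocales
    (vocales == consonantes) && intercalado palabra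

-- body of the inner 'for j in range(i+1, n+1)' loop (trozo = palabra[i:j])
def pvStepA (l : List Char) (i : Int) (mejor : List Char) (j : Int) : List Char :=
  let trozo := PySem.List.slice l (some i) (some j)
  if PySem.List.len trozo ≤ PySem.List.len mejor then mejor
  else if completamente_equilibrada trozo == true then trozo
  else mejor

-- body of the outer 'for i in range(n)' loop
def pvInnerA (l : List Char) (n : Int) (mejor : List Char) (i : Int) : List Char :=
  (PySem.List.pyRange (i + 1) (n + 1) 1).foldl (pvStepA l i) mejor

def mayor_trozo_completamente_equilibrado (palabra : String) : String :=
  let l := palabra.toList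
  let n : Int := PySem.List.len l
  let mejor := (PySem.List.pyRange 0 n 1).foldl (pvInnerA l n) ([] : List Char)
  String.ofList mejor

-- ===== PORT B =====
def es_vocal_alt (c : Char) : Bool := "aeiouAEIOU".toList.contains c

-- body of the 'for i in range(1, n)' loop; state = (best_len, best_start, run_start)
def pvStepB (l : List Char) (st : Int × Int × Int) (i : Int) : Int × Int × Int :=
  let run_start :=
    if es_vocal_alt (PySem.List.pyGetD l i ' ') ==
       es_vocal_alt (PySem.List.pyGetD l (i - 1) ' ') then i else st.2.2
  let run_len := i - run_start + 1
  let even := run_len - PySem.Int.mod run_len 2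
  if even > st.1 then (even, i - even + 1, run_start) else (st.1, st.2.1, run_start)

def mayor_trozo_completamente_equilibrado_alt (palabra : String) : String :=
  let l := palabra.toList
  let n : Int := PySem.List.len l
  let st := (PySem.List.pyRange 1 n 1).foldl (pvStepB l) (0, 0, 0)
  String.ofList (PySem.List.slice l (some st.2.1) (some (st.2.1 + st.1)))

-- ===== PRECONDITION & SPEC =====
def Spec_mayor_trozo_completamente_equilibrado (palabra : String) (out : String) : Prop := out = mayor_trozo_completamente_equilibrado_alt palabra
instance (palabra : String) (out : String) : Decidable (Spec_mayor_trozo_completamente_equilibrado palabra out) := by unfold Spec_mayor_trozo_completamente_equilibrado; infer_instance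

-- ===== CLAIM (what is proved, stated in full; the proofs are below) =====
def Claim_equal_mayor_trozo_completamente_equilibrado : Prop := ∀ (palabra : String), Dom_mayor_trozo_completamente_equilibrado palabra → Spec_mayor_trozo_completamente_equilibrado palabra (mayor_trozo_completamente_equilibrado palabra)

-- ===== LEMMAS AND PROOFS =====

-- length of the maximal alternating prefix
def pvRun : List Char → Nat
  | [] => 0
  | [_] => 1
  | a :: b :: t => if es_vocal a != es_vocal b then pvRun (b :: t) + 1 else 1

-- even part of a natural number
def pvEv (m : Nat) : Nat := m - m % 2

lemma pvEv_mono {a b : Nat} (h : a ≤ b) : pvEv a ≤ pvEv b := by unfold pvEv; omega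

lemma pvEv_le (a : Nat) : pvEv a ≤ a := by unfold pvEv; omega

lemma pvEv_even (a : Nat) : pvEv a % 2 = 0 := by unfold pvEv; omega

lemma pvEv_ge_of_even_le {a e : Nat} (ha : a % 2 = 0) (h : a ≤ e) : a ≤ pvEv e := by
  unfold pvEv; omega

lemma pvRun_le (t : List Char) : pvRun t ≤ t.length := by
  induction t using pvRun.induct with
  | case1 => simp [pvRun]
  | case2 a => simp [pvRun]
  | case3 a b t h ih => simp [pvRun, h] at ih ⊢; omega
  | case4 a b t h => simp [pvRun, h]

lemma pvRun_pos (t : List Char) (h : t ≠ []) : 1 ≤ pvRun t := by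
  match t with
  | [_] => simp [pvRun]
  | a :: b :: u => simp only [pvRun]; split <;> omega

lemma pvRun_take (t : List Char) (m : Nat) : pvRun (t.take m) = min m (pvRun t) := by
  induction t using pvRun.induct generalizing m with
  | case1 => simp [pvRun]
  | case2 a =>
      match m with
      | 0 => simp [pvRun]
      | m + 1 => simp [pvRun]
  | case3 a b t h ih =>
      match m with
      | 0 => simp [pvRun]
      | 1 => have := pvRun_pos (b :: t) (by simp)
             simp [pvRun, h]
      | m + 2 =>
          have hih := ih (m + 1)
          simp only [List.take_succ_cons] at hih ⊢
          simp [pvRun, h] at hih ⊢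
          omega
  | case4 a b t h =>
      match m with
      | 0 => simp [pvRun]
      | 1 => simp [pvRun, h]
      | m + 2 =>
          simp only [List.take_succ_cons]
          simp [pvRun, h]

-- alternation test between positions i and i+1 (A's index-based test)
def pvAlt (l : List Char) (i : Nat) : Bool :=
  es_vocal (l.getD i ' ') != es_vocal (l.getD (i + 1) ' ')

lemma pvChain_iff_run (t : List Char) :
    (List.IsChain (fun a b => es_vocal a ≠ es_vocal b) t) ↔ pvRun t = t.length := by
  induction t using pvRun.induct with
  | case1 => simp [pvRun]
  | case2 a => simp [pvRun]
  | case3 a b t h ih =>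
      rw [List.isChain_cons_cons]
      simp only [pvRun, h, if_true]
      simp only [bne_iff_ne, ne_eq] at h
      simp [h, ih]
  | case4 a b t h =>
      rw [List.isChain_cons_cons]
      simp only [pvRun, h]
      simp only [bne_iff_ne, ne_eq, not_not] at h
      simp [h]

lemma pvIntercalado_iff (t : List Char) : intercalado t = true ↔ pvRun t = t.length := by
  rw [← pvChain_iff_run, List.isChain_iff_getElem]
  unfold intercalado
  simp only [List.all_eq_true, PySem.List.len_eq]
  constructor
  · intro h i hi
    have hm : ((i : Nat) : Int) ∈ PySem.List.pyRange 0 ((t.length : Int) - 1) 1 := by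
      rw [PySem.List.mem_pyRange_one]; omega
    have := h _ hm
    simp only [PySem.List.pyGetD_natCast] at this
    have h1 : ((i : Nat) : Int) + 1 = (((i : Nat) + 1 : Nat) : Int) := by push_cast; ring
    rw [h1, PySem.List.pyGetD_natCast] at this
    rw [List.getD_eq_getElem _ _ (by omega), List.getD_eq_getElem _ _ (by omega)] at this
    simpa using this
  · intro h x hx
    rw [PySem.List.mem_pyRange_one] at hx
    obtain ⟨hx0, hx1⟩ := hx
    obtain ⟨k, rfl⟩ : ∃ k : Nat, x = (k : Int) := ⟨x.toNat, by omega⟩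
    have hk : k < t.length - 1 := by omega
    have := h k (by omega)
    simp only [PySem.List.pyGetD_natCast]
    have h1 : ((k : Nat) : Int) + 1 = (((k : Nat) + 1 : Nat) : Int) := by push_cast; ring
    rw [h1, PySem.List.pyGetD_natCast]
    rw [List.getD_eq_getElem _ _ (by omega), List.getD_eq_getElem _ _ (by omega)]
    simpa using this

-- alternating even-length strings have as many vowels as consonants
lemma pvCount_of_run (n : Nat) : ∀ t : List Char, t.length = n → pvRun t = n → n % 2 = 0 →
    2 * t.countP es_vocal = n := by
  induction n using Nat.strong_induction_on with
  | _ n ih =>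
    intro t hlen hrun hpar
    match t with
    | [] => simp only [List.countP_nil]; simp [pvRun] at hrun; omega
    | [a] => simp at hlen; simp [pvRun] at hrun; omega
    | a :: b :: u =>
      simp only [List.length_cons] at hlen
      by_cases hd : es_vocal a != es_vocal b
      · simp only [pvRun, hd, if_true] at hrun
        have hbu : pvRun (b :: u) = (b :: u).length := by simp; omega
        have hu : pvRun u = u.length := by
          match u with
          | [] => simp [pvRun]
          | c :: u' =>
            by_cases hd2 : es_vocal b != es_vocal c
            · simp only [pvRun, hd2, if_true] at hbu; simp at hbu ⊢; omega
            · simp only [pvRun, hd2] at hbu; simp at hbu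
        have := ih (n - 2) (by omega) u (by omega) (by omega) (by omega)
        have hone : (if es_vocal a then 1 else 0) + (if es_vocal b then 1 else 0) = 1 := by
          simp only [bne_iff_ne, ne_eq] at hd
          by_cases ha : es_vocal a <;> by_cases hb : es_vocal b <;> simp_all
        simp only [List.countP_cons]
        by_cases ha : es_vocal a = true <;> by_cases hb : es_vocal b = true <;>
          simp_all <;> omega
      · simp [pvRun, hd] at hrun; omega

-- A's balance test on a slice, characterised through pvRun
lemma pvBal (u : List Char) (m : Nat) (hm : m ≤ u.length) :
    completamente_equilibrada (u.take m) = decide (m % 2 = 0 ∧ m ≤ pvRun u) := by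
  unfold completamente_equilibrada
  have hlen : (u.take m).length = m := by simp; omega
  simp only [PySem.List.len_eq, hlen]
  have h2 : PySem.Int.mod (m:Int) 2 = ((m % 2 : Nat) : Int) := by exact_mod_cast PySem.Int.mod_natCast m 2
  rw [h2]
  by_cases hpar : m % 2 = 0
  · rw [if_neg (by simp [hpar])]
    rw [PySem.List.foldl_if_add_one]
    have hint : intercalado (u.take m) = decide (m ≤ pvRun u) := by
      rw [Bool.eq_iff_iff, pvIntercalado_iff, hlen, pvRun_take]
      simp
    rw [hint]
    by_cases hle : m ≤ pvRun u
    · have hcnt := pvCount_of_run m (u.take m) hlen (by rw [pvRun_take]; omega) hpar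
      have hbeq : (((0:Int) + ((u.take m).countP es_vocal : Int)) == ((m : Int) - (0 + ((u.take m).countP es_vocal : Int)))) = true := by
        simp only [beq_iff_eq]; omega
      rw [hbeq]
      simp [hpar, hle]
    · simp [hpar, hle]
  · rw [if_pos (by simp; omega)]
    simp [hpar]

-- run recurrence and algebra on drops
lemma pvRun_drop_succ (l : List Char) (i : Nat) (h : i + 1 < l.length) :
    pvRun (l.drop i) = if pvAlt l i then pvRun (l.drop (i + 1)) + 1 else 1 := by
  have h1 : l.drop i = l[i] :: l.drop (i + 1) := List.drop_eq_getElem_cons (by omega)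
  have h2 : l.drop (i + 1) = l[i + 1] :: l.drop (i + 2) := List.drop_eq_getElem_cons (by omega)
  rw [h1, h2]
  unfold pvAlt
  rw [List.getD_eq_getElem _ _ (by omega), List.getD_eq_getElem _ _ (by omega)]
  simp only [pvRun]

lemma pvRun_drop_le_sub (l : List Char) (i : Nat) : pvRun (l.drop i) ≤ l.length - i := by
  have := pvRun_le (l.drop i); simpa using this

lemma pvRun_split (l : List Char) (s t : Nat) (hst : s ≤ t)
    (h : t - s < pvRun (l.drop s)) :
    pvRun (l.drop s) = (t - s) + pvRun (l.drop t) := by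
  obtain ⟨d, rfl⟩ : ∃ d, t = s + d := ⟨t - s, by omega⟩
  clear hst
  induction d generalizing s with
  | zero => simp
  | succ d ih =>
      have hlen : s + 1 < l.length := by
        have := pvRun_drop_le_sub l s; omega
      have hrec := pvRun_drop_succ l s hlen
      by_cases ha : pvAlt l s
      · rw [hrec, if_pos ha] at h ⊢
        have : s + (d + 1) = (s + 1) + d := by omega
        rw [this] at h ⊢
        have := ih (s + 1) (by omega)
        omega
      · rw [hrec, if_neg ha] at h; omega

-- uncapped and capped best even alternating length starting at s
def pvE (l : List Char) (s : Nat) : Nat := pvEv (pvRun (l.drop s))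
def pvEC (l : List Char) (k s : Nat) : Nat := pvEv (min (pvRun (l.drop s)) (k - s))

-- canonical description of "longest balanced slice, leftmost among longest"
def pvCanon (_l : List Char) (E : Nat → Nat) (k bl bs : Nat) : Prop :=
  (∀ s < k, E s ≤ bl) ∧ (∀ s < bs, E s < bl) ∧
  ((bl = 0 ∧ bs = 0) ∨ (0 < bl ∧ bl % 2 = 0 ∧ bs < k ∧ bl ≤ E bs))

lemma pvCanon_unique (E : Nat → Nat) (k : Nat)
    {bl bs bl' bs' : Nat}
    {l : List Char} (h1 : pvCanon l E k bl bs) (h2 : pvCanon l E k bl' bs') :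
    bl = bl' ∧ (bl = 0 ∨ bs = bs') := by
  obtain ⟨hb1, hm1, hat1⟩ := h1
  obtain ⟨hb2, hm2, hat2⟩ := h2
  have hgle : bl' ≤ bl := by
    rcases hat2 with ⟨rfl, -⟩ | hr
    · omega
    · exact le_trans hr.2.2.2 (hb1 _ hr.2.2.1)
  have hgle' : bl ≤ bl' := by
    rcases hat1 with ⟨rfl, -⟩ | hr
    · omega
    · exact le_trans hr.2.2.2 (hb2 _ hr.2.2.1)
  refine ⟨by omega, ?_⟩
  by_cases hz : bl = 0
  · exact Or.inl hz
  · right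
    rcases hat1 with ⟨rfl, -⟩ | hr1
    · omega
    rcases hat2 with ⟨h0, -⟩ | hr2
    · omega
    by_contra hne
    rcases Nat.lt_or_ge bs bs' with hlt | hge
    · have := hm2 bs hlt
      have := hr1.2.2.2
      omega
    · have hlt : bs' < bs := by omega
      have := hm1 bs' hlt
      have := hr2.2.2.2
      omega

lemma pvRun_ge_sub (l : List Char) (s t k : Nat) (hs : s ≤ t) (ht : t ≤ k)
    (h : k - s ≤ pvRun (l.drop s)) : k - t ≤ pvRun (l.drop t) := by
  rcases Nat.eq_or_lt_of_le ht with rfl | hlt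
  · omega
  · have := pvRun_split l s t hs (by omega)
    omega

lemma pvRun_stop (l : List Char) (s p : Nat) (hp : p + 1 < l.length) (hs : s ≤ p)
    (hb : pvAlt l p = false) : pvRun (l.drop s) ≤ p + 1 - s := by
  by_contra hcon
  have hsplit := pvRun_split l s p hs (by omega)
  have hrec := pvRun_drop_succ l p hp
  rw [hb] at hrec
  simp at hrec
  omega

lemma pvTake_len (l : List Char) (k e : Nat) (h : k + e ≤ l.length) :
    ((l.drop k).take e).length = e := by simp; omega

lemma pvE_le_sub (l : List Char) (k : Nat) : k + pvE l k ≤ l.length ∨ l.length ≤ k := by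
  rcases Nat.lt_or_ge k l.length with h | h
  · left
    have h1 := pvEv_le (pvRun (l.drop k))
    have h2 := pvRun_drop_le_sub l k
    unfold pvE; omega
  · right; exact h

lemma pvInnerA_gen (l : List Char) (k : Nat) (hk : k < l.length) :
    ∀ (d j : Nat) (m : List Char), k < j → j + d = l.length + 1 →
    (PySem.List.pyRange (j : Int) ((l.length : Int) + 1) 1).foldl (pvStepA l (k : Int)) m =
    if j ≤ k + pvE l k ∧ m.length < pvE l k then (l.drop k).take (pvE l k) else m := by
  have hER : pvE l k ≤ pvRun (l.drop k) := pvEv_le _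
  have hEe : pvE l k % 2 = 0 := pvEv_even _
  have hEtop : k + pvE l k ≤ l.length := by
    rcases pvE_le_sub l k with h | h
    · exact h
    · omega
  intro d
  induction d with
  | zero =>
      intro j m hj hlen
      rw [show ((l.length : Int) + 1) = (j : Int) by omega]
      rw [PySem.List.pyRange_one_eq_nil (by omega)]
      rw [if_neg (by omega)]
      rfl
  | succ d ih =>
      intro j m hj hlen
      rw [PySem.List.pyRange_one_cons (by omega)]
      rw [show ((j : Int) + 1) = ((j + 1 : Nat) : Int) by push_cast; ring]
      rw [List.foldl_cons]
      have hstep : pvStepA l (k : Int) m (j : Int) =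
          if j - k ≤ m.length then m
          else if (j - k) % 2 = 0 ∧ j - k ≤ pvRun (l.drop k) then (l.drop k).take (j - k)
          else m := by
        unfold pvStepA
        rw [PySem.List.slice_natCast]
        have hlt : ((l.drop k).take (j - k)).length = j - k := by
          apply pvTake_len; omega
        simp only [PySem.List.len_eq, hlt]
        rw [pvBal _ _ (by simp; omega)]
        by_cases hc : j - k ≤ m.length
        · rw [if_pos (by exact_mod_cast Int.ofNat_le.mpr hc), if_pos hc]
        · rw [if_neg (by omega), if_neg hc]
          by_cases hb : (j - k) % 2 = 0 ∧ j - k ≤ pvRun (l.drop k)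
          · rw [if_pos hb, if_pos (by simpa using hb)]
          · rw [if_neg hb, if_neg (by simpa using hb)]
      rw [hstep]
      by_cases hc : j - k ≤ m.length
      · rw [if_pos hc, ih (j + 1) m (by omega) (by omega)]
        by_cases hcond : j ≤ k + pvE l k ∧ m.length < pvE l k
        · rw [if_pos hcond, if_pos (by omega)]
        · rw [if_neg hcond, if_neg (by omega)]
      · rw [if_neg hc]
        by_cases hb : (j - k) % 2 = 0 ∧ j - k ≤ pvRun (l.drop k)
        · rw [if_pos hb, ih (j + 1) _ (by omega) (by omega)]
          have hjE : j - k ≤ pvE l k := pvEv_ge_of_even_le hb.1 hb.2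
          have hlt : ((l.drop k).take (j - k)).length = j - k := by
            apply pvTake_len; omega
          rw [hlt]
          by_cases hcond : j + 1 ≤ k + pvE l k ∧ j - k < pvE l k
          · rw [if_pos hcond, if_pos ⟨by omega, by omega⟩]
          · rw [if_neg hcond]
            have hEeq : pvE l k = j - k := by omega
            rw [if_pos ⟨by omega, by omega⟩, hEeq]
        · rw [if_neg hb, ih (j + 1) m (by omega) (by omega)]
          by_cases hcond : j ≤ k + pvE l k ∧ m.length < pvE l k
          · have hne : j ≠ k + pvE l k := by
              intro he
              exact hb ⟨by omega, by omega⟩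
            rw [if_pos hcond, if_pos (by omega)]
          · rw [if_neg hcond, if_neg (by omega)]

lemma pvInnerA_char (l : List Char) (k : Nat) (hk : k < l.length) (m : List Char) :
    pvInnerA l (l.length : Int) m (k : Int) =
    if m.length < pvE l k then (l.drop k).take (pvE l k) else m := by
  unfold pvInnerA
  rw [show ((k : Int) + 1) = ((k + 1 : Nat) : Int) by push_cast; ring]
  rw [pvInnerA_gen l k hk (l.length - k) (k + 1) m (by omega) (by omega)]
  have hEe : pvE l k % 2 = 0 := pvEv_even _
  by_cases hcond : m.length < pvE l k
  · rw [if_pos ⟨by omega, hcond⟩, if_pos hcond]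
  · rw [if_neg (by omega), if_neg hcond]

-- state invariant of A's outer loop after the starts < k have been processed
def pvStA (l : List Char) (k : Nat) (m : List Char) : Prop :=
  ∃ bl bs, pvCanon l (pvE l) k bl bs ∧ m = (l.drop bs).take bl

lemma pvE_run_le (l : List Char) (s : Nat) : pvE l s ≤ pvRun (l.drop s) := pvEv_le _

lemma pvStA_len (l : List Char) {k : Nat} {m : List Char} (h : pvStA l k m)
    {bl bs : Nat} (hbl : pvCanon l (pvE l) k bl bs ∧ m = (l.drop bs).take bl) :
    m.length = bl := by
  obtain ⟨hc, rfl⟩ := hbl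
  rcases hc.2.2 with ⟨rfl, rfl⟩ | hr
  · simp
  · have h1 : bl ≤ pvRun (l.drop bs) := le_trans hr.2.2.2 (pvE_run_le l bs)
    have h2 := pvRun_drop_le_sub l bs
    apply pvTake_len; omega

lemma pvStepA_outer (l : List Char) (k : Nat) (hk : k < l.length) (m : List Char)
    (h : pvStA l k m) : pvStA l (k + 1) (pvInnerA l (l.length : Int) m (k : Int)) := by
  obtain ⟨bl, bs, hc, rfl⟩ := h
  have hlen : ((l.drop bs).take bl).length = bl :=
    pvStA_len l ⟨bl, bs, hc, rfl⟩ ⟨hc, rfl⟩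
  rw [pvInnerA_char l k hk _, hlen]
  obtain ⟨hb, hm, hat⟩ := hc
  by_cases hlt : bl < pvE l k
  · rw [if_pos hlt]
    refine ⟨pvE l k, k, ⟨?_, ?_, ?_⟩, rfl⟩
    · intro s hs
      rcases Nat.lt_or_ge s k with h' | h'
      · exact le_trans (hb s h') (by omega)
      · have : s = k := by omega
        subst this; omega
    · intro s hs; exact lt_of_le_of_lt (hb s hs) hlt
    · exact Or.inr ⟨by omega, pvEv_even _, by omega, le_refl _⟩
  · rw [if_neg hlt]
    refine ⟨bl, bs, ⟨?_, hm, ?_⟩, rfl⟩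
    · intro s hs
      rcases Nat.lt_or_ge s k with h' | h'
      · exact hb s h'
      · have : s = k := by omega
        subst this; omega
    · rcases hat with h' | h'
      · exact Or.inl h'
      · exact Or.inr ⟨h'.1, h'.2.1, by omega, h'.2.2.2⟩

lemma pvOuterA (l : List Char) : ∀ (d k : Nat) (m : List Char), k + d = l.length →
    pvStA l k m →
    pvStA l l.length
      ((PySem.List.pyRange (k : Int) (l.length : Int) 1).foldl (pvInnerA l (l.length : Int)) m) := by
  intro d
  induction d with
  | zero =>
      intro k m hkd h
      obtain rfl : k = l.length := by omega
      rw [PySem.List.pyRange_one_eq_nil (by omega)]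
      exact h
  | succ d ih =>
      intro k m hkd h
      rw [PySem.List.pyRange_one_cons (by omega), List.foldl_cons]
      rw [show ((k : Int) + 1) = ((k + 1 : Nat) : Int) by push_cast; ring]
      exact ih (k + 1) _ (by omega) (pvStepA_outer l k (by omega) m h)

-- capped best even alternating length starting at s, within the prefix of length k
lemma pvEC_mono_k (l : List Char) (k s : Nat) : pvEC l k s ≤ pvEC l (k + 1) s := by
  unfold pvEC; exact pvEv_mono (by omega)

lemma pvEC_top (l : List Char) : pvEC l l.length = pvE l := by
  funext s
  unfold pvEC pvE
  congr 1
  have := pvRun_drop_le_sub l s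
  omega

lemma pv_esvocal_alt_eq : es_vocal_alt = es_vocal := rfl

-- state invariant of B's loop after positions 1..k-1 have been processed
def pvStB (l : List Char) (k : Nat) (st : Int × Int × Int) : Prop :=
  ∃ bl bs rs : Nat, st = ((bl : Int), (bs : Int), (rs : Int)) ∧
    pvCanon l (pvEC l k) k bl bs ∧
    rs < k ∧ k - rs ≤ pvRun (l.drop rs) ∧ (rs = 0 ∨ pvAlt l (rs - 1) = false)

lemma pvStepB_inv (l : List Char) (k : Nat) (hk1 : 1 ≤ k) (hk : k < l.length)
    (st : Int × Int × Int) (h : pvStB l k st) : pvStB l (k + 1) (pvStepB l st (k : Int)) := by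
  obtain ⟨bl, bs, rs, rfl, ⟨hbound, hmin, hat⟩, hrsk, hrun, hbdy⟩ := h
  have hbsk : bs ≤ k := by
    rcases hat with ⟨rfl, rfl⟩ | hr
    · omega
    · omega
  have hdropk : l.drop k ≠ [] := by simp only [ne_eq, List.drop_eq_nil_iff]; omega
  simp only [pvStepB, pv_esvocal_alt_eq]
  rw [show ((k : Int) - 1) = ((k - 1 : Nat) : Int) by omega]
  simp only [PySem.List.pyGetD_natCast]
  have hAlt : pvAlt l (k - 1) = !(es_vocal (l.getD k ' ') == es_vocal (l.getD (k - 1) ' ')) := by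
    unfold pvAlt
    rw [show k - 1 + 1 = k from by omega]
    cases es_vocal (l.getD k ' ') <;> cases es_vocal (l.getD (k - 1) ' ') <;> rfl
  by_cases hcond : (es_vocal (l.getD k ' ') == es_vocal (l.getD (k - 1) ' ')) = true
  · -- the run breaks at position k - 1
    have halt : pvAlt l (k - 1) = false := by rw [hAlt, hcond]; rfl
    rw [if_pos hcond]
    have hEpres : ∀ s, s < k → pvEC l (k + 1) s = pvEC l k s := by
      intro s hs
      have hstop := pvRun_stop l s (k - 1) (by omega) (by omega) halt
      unfold pvEC
      congr 1
      omega
    have hrl : ((k : Int) - (k : Int) + 1) = (1 : Int) := by ring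
    rw [hrl, show PySem.Int.mod 1 2 = 1 from by decide]
    rw [if_neg (by omega)]
    refine ⟨bl, bs, k, rfl, ⟨?_, ?_, ?_⟩, by omega, ?_, ?_⟩
    · intro s hs
      rcases Nat.lt_or_ge s k with h' | h'
      · rw [hEpres s h']; exact hbound s h'
      · have hsk : s = k := by omega
        have h1 : pvEC l (k + 1) k ≤ pvEv 1 := by
          unfold pvEC; exact pvEv_mono (by omega)
        have h2 : pvEv 1 = 0 := by decide
        rw [hsk]; omega
    · intro s hs
      rw [hEpres s (by omega)]
      exact hmin s hs
    · rcases hat with h' | h'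
      · exact Or.inl h'
      · refine Or.inr ⟨h'.1, h'.2.1, by omega, ?_⟩
        rw [hEpres bs (by omega)]
        exact h'.2.2.2
    · have := pvRun_pos (l.drop k) hdropk
      omega
    · exact Or.inr halt
  · -- the run extends through position k
    have halt : pvAlt l (k - 1) = true := by
      rw [hAlt]
      cases hx : (es_vocal (l.getD k ' ') == es_vocal (l.getD (k - 1) ' ')) <;> simp_all
    rw [if_neg hcond]
    have hR1 : ((k : Int) - (rs : Int) + 1) = ((k - rs + 1 : Nat) : Int) := by omega
    set R1 := k - rs + 1 with hR1def
    have hrun' : k + 1 - rs ≤ pvRun (l.drop rs) := by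
      have h1 := pvRun_split l rs (k - 1) (by omega) (by omega)
      have h2 := pvRun_drop_succ l (k - 1) (by omega)
      rw [show k - 1 + 1 = k from by omega] at h2
      rw [halt] at h2
      simp only [if_true] at h2
      have h3 := pvRun_pos (l.drop k) hdropk
      omega
    have hEup : ∀ s, rs ≤ s → s ≤ k → pvEC l (k + 1) s = pvEv (k + 1 - s) := by
      intro s h1 h2
      have := pvRun_ge_sub l rs s (k + 1) h1 (by omega) hrun'
      unfold pvEC
      congr 1
      omega
    have hEold : ∀ s, rs ≤ s → s < k → pvEC l k s = pvEv (k - s) := by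
      intro s h1 h2
      have := pvRun_ge_sub l rs s (k + 1) h1 (by omega) hrun'
      unfold pvEC
      congr 1
      omega
    have hElow : ∀ s, s < rs → pvEC l (k + 1) s = pvEC l k s := by
      intro s hs
      have hrs1 : 1 ≤ rs := by omega
      rcases hbdy with h0 | hb
      · omega
      · have hstop := pvRun_stop l s (rs - 1) (by omega) (by omega) hb
        rw [show rs - 1 + 1 = rs from by omega] at hstop
        unfold pvEC
        congr 1
        omega
    rw [hR1]
    have hmodc : PySem.Int.mod ((R1 : Nat) : Int) 2 = ((R1 % 2 : Nat) : Int) := by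
      exact_mod_cast PySem.Int.mod_natCast R1 2
    rw [hmodc]
    rw [show ((R1 : Nat) : Int) - ((R1 % 2 : Nat) : Int) = ((pvEv R1 : Nat) : Int) from by
      unfold pvEv; omega]
    have hErs : pvEC l (k + 1) rs = pvEv R1 := by
      rw [hEup rs (le_refl rs) (by omega)]
      congr 1
      omega
    by_cases hgt : ((pvEv R1 : Nat) : Int) > (bl : Int)
    · have hblt : bl < pvEv R1 := by exact_mod_cast hgt
      have hpar : R1 % 2 = 0 := by
        by_contra hodd
        have h4 : pvEC l k rs = pvEv (k - rs) := hEold rs (le_refl rs) hrsk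
        have h5 := hbound rs hrsk
        unfold pvEv at h4 hblt
        omega
      have hbs' : ((k : Int) - ((pvEv R1 : Nat) : Int) + 1) = ((rs : Nat) : Int) := by
        unfold pvEv
        omega
      rw [if_pos hgt, hbs']
      refine ⟨pvEv R1, rs, rs, rfl, ⟨?_, ?_, ?_⟩, by omega, hrun', hbdy⟩
      · intro s hs
        rcases Nat.lt_or_ge s rs with h' | h'
        · rw [hElow s h']
          have := hbound s (by omega)
          omega
        · rw [hEup s h' (by omega)]
          have := pvEv_mono (show k + 1 - s ≤ k + 1 - rs from by omega)
          have : pvEv (k + 1 - rs) = pvEv R1 := by congr 1; omega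
          omega
      · intro s hs
        rw [hElow s hs]
        have := hbound s (by omega)
        omega
      · exact Or.inr ⟨by omega, pvEv_even _, by omega, by rw [hErs]⟩
    · have hle : pvEv R1 ≤ bl := by omega
      rw [if_neg hgt]
      refine ⟨bl, bs, rs, rfl, ⟨?_, ?_, ?_⟩, by omega, hrun', hbdy⟩
      · intro s hs
        rcases Nat.lt_or_ge s rs with h' | h'
        · rw [hElow s h']
          exact hbound s (by omega)
        · rcases Nat.lt_or_ge s (k + 1) with h'' | h''
          · rw [hEup s h' (by omega)]
            have hm1 := pvEv_mono (show k + 1 - s ≤ k + 1 - rs from by omega)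
            have hm2 : pvEv (k + 1 - rs) = pvEv R1 := by congr 1; omega
            omega
          · omega
      · intro s hs
        rcases Nat.lt_or_ge s rs with h' | h'
        · rw [hElow s h']
          exact hmin s hs
        · exfalso
          rcases hat with ⟨rfl, rfl⟩ | hr
          · omega
          · have hup := hEup s h' (by omega)
            have h6 : bl ≤ pvEC l k bs := hr.2.2.2
            have h7 : pvEC l k bs ≤ k - bs := by
              unfold pvEC
              have := pvEv_le (min (pvRun (l.drop bs)) (k - bs))
              omega
            have h8 : pvEv (k + 1 - s) ≥ k - s := by unfold pvEv; omega
            have hm1 := pvEv_mono (show k + 1 - s ≤ k + 1 - rs from by omega)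
            have hm2 : pvEv (k + 1 - rs) = pvEv R1 := by congr 1; omega
            omega
      · rcases hat with h' | h'
        · exact Or.inl h'
        · refine Or.inr ⟨h'.1, h'.2.1, by omega, ?_⟩
          have := pvEC_mono_k l k bs
          have := h'.2.2.2
          omega

lemma pvOuterB (l : List Char) : ∀ (d k : Nat) (st : Int × Int × Int), 1 ≤ k →
    k + d = l.length → pvStB l k st →
    pvStB l l.length ((PySem.List.pyRange (k : Int) (l.length : Int) 1).foldl (pvStepB l) st) := by
  intro d
  induction d with
  | zero =>
      intro k st hk1 hkd h
      obtain rfl : k = l.length := by omega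
      rw [PySem.List.pyRange_one_eq_nil (by omega)]
      exact h
  | succ d ih =>
      intro k st hk1 hkd h
      rw [PySem.List.pyRange_one_cons (by omega), List.foldl_cons]
      rw [show ((k : Int) + 1) = ((k + 1 : Nat) : Int) by push_cast; ring]
      exact ih (k + 1) _ (by omega) (by omega) (pvStepB_inv l k hk1 (by omega) st h)

lemma pvMain (palabra : String) :
    mayor_trozo_completamente_equilibrado palabra = mayor_trozo_completamente_equilibrado_alt palabra := by
  unfold mayor_trozo_completamente_equilibrado mayor_trozo_completamente_equilibrado_alt
  simp only [PySem.List.len_eq]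
  set l := palabra.toList with hl
  rcases Nat.eq_zero_or_pos l.length with hn | hn
  · rw [PySem.List.pyRange_one_eq_nil (by omega), PySem.List.pyRange_one_eq_nil (by omega)]
    simp only [List.foldl_nil]
    have h0 : PySem.List.slice l (some ((0 : Nat) : Int)) (some ((0 : Nat) : Int)) =
        (l.drop 0).take (0 - 0) := PySem.List.slice_natCast l 0 0
    norm_num at h0 ⊢
    rw [h0]
  · have hcanon0 : pvCanon l (pvE l) 0 0 0 :=
      ⟨by intro s hs; omega, by intro s hs; omega, Or.inl ⟨rfl, rfl⟩⟩
    have hA := pvOuterA l l.length 0 [] (by omega) ⟨0, 0, hcanon0, by simp⟩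
    norm_num at hA
    obtain ⟨bl, bs, hcA, heqA⟩ := hA
    rw [heqA]
    have hlne : l ≠ [] := List.length_pos_iff.mp hn
    have hinit : pvStB l 1 (0, 0, 0) := by
      refine ⟨0, 0, 0, by norm_num, ⟨?_, ?_, Or.inl ⟨rfl, rfl⟩⟩, by omega, ?_, Or.inl rfl⟩
      · intro s hs
        have hs0 : s = 0 := by omega
        rw [hs0]
        have h1 : pvEC l 1 0 ≤ pvEv 1 := by unfold pvEC; exact pvEv_mono (by omega)
        have h2 : pvEv 1 = 0 := by decide
        omega
      · intro s hs; omega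
      · have := pvRun_pos l hlne
        simp only [List.drop_zero]
        omega
    have hB := pvOuterB l (l.length - 1) 1 (0, 0, 0) (le_refl 1) (by omega) hinit
    norm_num at hB
    obtain ⟨bl', bs', rs, heqB, hcB, -⟩ := hB
    rw [pvEC_top l] at hcB
    rw [heqB]
    obtain ⟨hbl, hbs⟩ := pvCanon_unique (pvE l) l.length hcA hcB
    have hslice : PySem.List.slice l (some ((bs' : Nat) : Int))
        (some (((bs' : Nat) : Int) + ((bl' : Nat) : Int))) = (l.drop bs').take bl' := by
      rw [show ((bs' : Nat) : Int) + ((bl' : Nat) : Int) = (((bs' + bl' : Nat)) : Int) by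
        push_cast; ring]
      rw [PySem.List.slice_natCast]
      congr 1
      omega
    show String.ofList ((l.drop bs).take bl) = String.ofList
      (PySem.List.slice l (some ((bs' : Nat) : Int)) (some (((bs' : Nat) : Int) + ((bl' : Nat) : Int))))
    rw [hslice]
    rcases hbs with h0 | rfl
    · rw [h0, ← hbl, h0]
      simp
    · rw [hbl]

-- ===== VERDICT (by name: the statement is the Claim_ definition above) =====
theorem mayor_trozo_completamente_equilibrado_spec : Claim_equal_mayor_trozo_completamente_equilibrado := by
  intro palabra _
  unfold Spec_mayor_trozo_completamente_equilibrado
  exact pvMain palabra
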